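-- pv_equiv track=rewrite | github.com/habebaRabie/Disk-Scheduling | CSCAN_CLOOK.py | CLOOK
-- ===== SOURCE A (Python) =====
-- def CLOOK(requestArray, initial):
--     totalHeadMovement = 0
--     requestArray.append(initial)
--     requestArray.sort()  # queue = 14,37,53,65,67,98,122,124,183
--     i = requestArray.index(initial)
--     elementCounter = 1
--
--     while i < len(requestArray) - 1:
--         totalHeadMovement += abs(requestArray[i + 1] - requestArray[i])
--         elementCounter += 1
--         i += 1
--
--     while elementCounter < len(requestArray):
--         if i == len(requestArray) - 1:
--             # totalHeadMovement += 199 - requestArray[i]  # 199 - 183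
--             # totalHeadMovement += 199  # 199 - 0 (start from beginning)
--             totalHeadMovement += requestArray[i] - requestArray[0]
--             i = 0
--         elif i == 0:
--             # totalHeadMovement += requestArray[0]  # 14 - 0
--             elementCounter += 1
--             i += 1
--         else:
--             totalHeadMovement += abs(requestArray[i] - requestArray[i - 1])
--             elementCounter += 1
--             i += 1
--
--     return totalHeadMovement
-- ===== SOURCE B (Python) =====
-- def CLOOK(requestArray, initial):
--     # Single O(n) pass (no sort): track overall min/max and the largest request
--     # strictly below the initial head position. Return value only; unlike A,
--     # this does not mutate requestArray.
--     lo = initial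
--     hi = initial
--     below = None
--     for x in requestArray:
--         if x < lo:
--             lo = x
--         if x > hi:
--             hi = x
--         if x < initial and (below is None or x > below):
--             below = x
--     if below is None:
--         return hi - initial
--     return (hi - initial) + (hi - lo) + (below - lo)
-- ===== Notes on version B (the rewrite author's own statement) =====
-- stated objective: faster
-- what changed: Replaced append+sort+index+two index-walking while loops by a single linear pass tracking min, max and the largest request below the initial position, returning (hi-initial)+(hi-lo)+(below-lo) (or hi-initial when nothing is below).
import Mathlib
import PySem

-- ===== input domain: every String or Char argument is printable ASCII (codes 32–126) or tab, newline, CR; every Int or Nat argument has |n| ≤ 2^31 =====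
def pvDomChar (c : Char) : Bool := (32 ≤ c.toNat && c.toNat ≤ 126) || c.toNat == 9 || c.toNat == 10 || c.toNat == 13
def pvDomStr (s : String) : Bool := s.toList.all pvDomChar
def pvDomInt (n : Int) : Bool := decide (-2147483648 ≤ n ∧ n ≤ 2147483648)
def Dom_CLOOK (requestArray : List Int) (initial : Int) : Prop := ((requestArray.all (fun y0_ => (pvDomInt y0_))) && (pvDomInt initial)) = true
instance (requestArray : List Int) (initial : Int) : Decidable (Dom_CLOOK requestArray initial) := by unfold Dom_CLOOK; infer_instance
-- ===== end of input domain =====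

-- B replaces A's sort + index walks by one linear min/max pass (proved equal below).
-- A mutates its list argument (append + in-place sort); B does not — the equivalence
-- proved here is about the RETURN value only.

-- ===== PORT A =====
-- first while loop: walk right from the head index, summing gaps; returns
-- (tot, i, counter); fuel bounds the iteration count (len provably suffices)
def CLOOKloop1 (s : List Int) : Nat → Nat → Int → Nat → Int × Nat × Nat
  | 0, i, tot, c => (tot, i, c)
  | fuel + 1, i, tot, c =>
    if i < s.length - 1 then
      CLOOKloop1 s fuel (i + 1)
        (tot + |PySem.List.pyGetD s ((i : Int) + 1) 0 - PySem.List.pyGetD s (i : Int) 0|) (c + 1)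
    else (tot, i, c)

-- second while loop: wrap to index 0 and walk right again; fuel bounds the iteration
-- count (2*len+2 provably suffices for every state A reaches)
def CLOOKloop2 (s : List Int) : Nat → Nat → Nat → Int → Int
  | 0, _, _, tot => tot
  | fuel + 1, i, c, tot =>
    if c < s.length then
      if i = s.length - 1 then
        CLOOKloop2 s fuel 0 c
          (tot + (PySem.List.pyGetD s (i : Int) 0 - PySem.List.pyGetD s 0 0))
      else if i = 0 then
        CLOOKloop2 s fuel (i + 1) (c + 1) tot
      else
        CLOOKloop2 s fuel (i + 1) (c + 1)
          (tot + |PySem.List.pyGetD s (i : Int) 0 - PySem.List.pyGetD s ((i : Int) - 1) 0|)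
    else tot

def CLOOK (requestArray : List Int) (initial : Int) : Int :=
  let arr := requestArray ++ [initial]
  let s := PySem.List.sorted arr (fun x => x) false
  -- exact: initial ∈ s, so index? is some and Python's .index never raises here
  let i0 := (PySem.List.index? s initial).getD 0
  let r1 := CLOOKloop1 s s.length i0 0 1
  CLOOKloop2 s (2 * s.length + 2) r1.2.1 r1.2.2 r1.1

-- ===== PORT B =====
-- one pass: state (lo, hi, largest request strictly below initial)
def CLOOKstep (initial : Int) (st : Int × Int × Option Int) (x : Int) : Int × Int × Option Int :=
  let lo := if x < st.1 then x else st.1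
  let hi := if x > st.2.1 then x else st.2.1
  let below :=
    if x < initial then
      match st.2.2 with
      | none => some x
      | some b => if x > b then some x else some b
    else st.2.2
  (lo, hi, below)

def CLOOK_alt (requestArray : List Int) (initial : Int) : Int :=
  let st := requestArray.foldl (CLOOKstep initial) (initial, initial, none)
  match st.2.2 with
  | none => st.2.1 - initial
  | some b => (st.2.1 - initial) + (st.2.1 - st.1) + (b - st.1)

-- ===== PRECONDITION & SPEC =====
def Spec_CLOOK (requestArray : List Int) (initial : Int) (out : Int) : Prop := out = CLOOK_alt requestArray initial
instance (requestArray : List Int) (initial : Int) (out : Int) : Decidable (Spec_CLOOK requestArray initial out) := by unfold Spec_CLOOK; infer_instance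

-- ===== CLAIM (what is proved, stated in full; the proofs are below) =====
def Claim_equal_CLOOK : Prop := ∀ (requestArray : List Int) (initial : Int), Dom_CLOOK requestArray initial → Spec_CLOOK requestArray initial (CLOOK requestArray initial)


-- ===== LEMMAS AND PROOFS =====

-- sorted-list index monotonicity, getD form
theorem pvGetD_mono (s : List Int) (hpw : s.Pairwise (· ≤ ·)) (i j : Nat)
    (hij : i ≤ j) (hj : j < s.length) : s.getD i 0 ≤ s.getD j 0 := by
  rcases Nat.eq_or_lt_of_le hij with h | h
  · subst h; exact le_refl _
  · rw [List.getD_eq_getElem _ _ (by omega), List.getD_eq_getElem _ _ hj]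
    exact List.pairwise_iff_getElem.mp hpw i j (by omega) hj h

-- first while loop: sums the gaps from i to the end (telescopes on the sorted list)
theorem loop1_spec (s : List Int) (hpw : s.Pairwise (· ≤ ·)) :
    ∀ d fuel i tot c, d = s.length - 1 - i → d ≤ fuel → i < s.length →
      CLOOKloop1 s fuel i tot c =
        (tot + (s.getD (s.length - 1) 0 - s.getD i 0), s.length - 1, c + d) := by
  intro d
  induction d with
  | zero =>
    intro fuel i tot c hd hf hi
    have h1 : ¬ i < s.length - 1 := by omega
    have h2 : i = s.length - 1 := by omega
    cases fuel with
    | zero => rw [CLOOKloop1]; simp [h2]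
    | succ f => rw [CLOOKloop1]; simp [h2]

  | succ d ih =>
    intro fuel i tot c hd hf hi
    obtain ⟨f, rfl⟩ : ∃ f, fuel = f + 1 := ⟨fuel - 1, by omega⟩
    rw [CLOOKloop1]
    have hlt : i < s.length - 1 := by omega
    simp only [if_pos hlt]
    rw [ih f (i + 1) _ _ (by omega) (by omega) (by omega)]
    have hc1 : ((i : Int) + 1) = ((i + 1 : Nat) : Int) := by push_cast; ring
    rw [hc1, PySem.List.pyGetD_natCast, PySem.List.pyGetD_natCast]
    have habs : |s.getD (i + 1) 0 - s.getD i 0| = s.getD (i + 1) 0 - s.getD i 0 := by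
      have := pvGetD_mono s hpw i (i + 1) (by omega) (by omega)
      rw [abs_of_nonneg (by omega)]
    rw [habs]
    refine Prod.ext ?_ (Prod.ext ?_ ?_) <;> simp <;> omega

-- second while loop: counter already full ⇒ no iteration
theorem loop2_done (s : List Int) (fuel i c : Nat) (tot : Int) (hc : ¬ c < s.length) :
    CLOOKloop2 s fuel i c tot = tot := by
  cases fuel with
  | zero => rfl
  | succ f => rw [CLOOKloop2]; simp [hc]

-- second while loop, else-branch phase: walk right from j, d steps remaining
theorem loop2_walk (s : List Int) (hpw : s.Pairwise (· ≤ ·)) :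
    ∀ d fuel j c tot, d ≤ fuel → c + d = s.length → 1 ≤ j → j + d ≤ s.length - 1 →
      CLOOKloop2 s fuel j c tot = tot + (s.getD (j + d - 1) 0 - s.getD (j - 1) 0) := by
  intro d
  induction d with
  | zero =>
    intro fuel j c tot _ hc _ _
    rw [loop2_done s fuel j c tot (by omega)]
    simp
  | succ d ih =>
    intro fuel j c tot hf hc hj hjd
    obtain ⟨f, rfl⟩ : ∃ f, fuel = f + 1 := ⟨fuel - 1, by omega⟩
    rw [CLOOKloop2]
    have hcn : c < s.length := by omega
    have hne1 : ¬ j = s.length - 1 := by omega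
    have hne0 : ¬ j = 0 := by omega
    simp only [if_pos hcn, if_neg hne1, if_neg hne0]
    have hc1 : ((j : Int) - 1) = ((j - 1 : Nat) : Int) := by omega
    rw [hc1, PySem.List.pyGetD_natCast, PySem.List.pyGetD_natCast]
    have habs : |s.getD j 0 - s.getD (j - 1) 0| = s.getD j 0 - s.getD (j - 1) 0 := by
      have := pvGetD_mono s hpw (j - 1) j (by omega) (by omega)
      rw [abs_of_nonneg (by omega)]
    rw [habs, ih f (j + 1) (c + 1) _ (by omega) (by omega) (by omega) (by omega)]
    have e1 : j + 1 + d - 1 = j + d := by omega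
    have e2 : j + 1 - 1 = j := by omega
    have e3 : j + (d + 1) - 1 = j + d := by omega
    rw [e1, e2, e3]
    ring

-- one-step unfolding of the second loop
theorem loop2_step (s : List Int) (f i c : Nat) (tot : Int) :
    CLOOKloop2 s (f + 1) i c tot =
      if c < s.length then
        if i = s.length - 1 then
          CLOOKloop2 s f 0 c (tot + (PySem.List.pyGetD s (i : Int) 0 - PySem.List.pyGetD s 0 0))
        else if i = 0 then CLOOKloop2 s f (i + 1) (c + 1) tot
        else CLOOKloop2 s f (i + 1) (c + 1)
              (tot + |PySem.List.pyGetD s (i : Int) 0 - PySem.List.pyGetD s ((i : Int) - 1) 0|)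
      else tot := rfl

-- second while loop from the state the first loop leaves (i = n-1, c = n-k), k ≥ 1
theorem loop2_start (s : List Int) (hpw : s.Pairwise (· ≤ ·)) (k : Nat) (tot : Int)
    (hk1 : 1 ≤ k) (hk2 : k ≤ s.length - 1) :
    CLOOKloop2 s (2 * s.length + 2) (s.length - 1) (s.length - k) tot =
      tot + (s.getD (s.length - 1) 0 - s.getD 0 0) + (s.getD (k - 1) 0 - s.getD 0 0) := by
  have hn2 : 2 ≤ s.length := by omega
  rw [show 2 * s.length + 2 = (2 * s.length + 1) + 1 from rfl, loop2_step,
      if_pos (show s.length - k < s.length by omega),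
      if_pos (rfl : s.length - 1 = s.length - 1)]
  rw [show 2 * s.length + 1 = (2 * s.length) + 1 from rfl, loop2_step,
      if_pos (show s.length - k < s.length by omega),
      if_neg (show ¬ (0 : Nat) = s.length - 1 by omega), if_pos (rfl : (0 : Nat) = 0)]
  rw [loop2_walk s hpw (k - 1) (2 * s.length) (0 + 1) (s.length - k + 1) _ (by omega) (by omega)
      (by omega) (by omega)]
  rw [PySem.List.pyGetD_natCast, show (0 : Int) = ((0 : Nat) : Int) from rfl,
      PySem.List.pyGetD_natCast]
  simp only [show 0 + 1 + (k - 1) - 1 = k - 1 by omega, show 0 + 1 - 1 = 0 by omega]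

-- closed form of port A in terms of the sorted list and the first index of `initial`
theorem CLOOK_closed (requestArray : List Int) (initial : Int) (k : Nat)
    (hk : PySem.List.index? (PySem.List.sorted (requestArray ++ [initial]) (fun x => x) false)
            initial = some k) :
    CLOOK requestArray initial =
      ((PySem.List.sorted (requestArray ++ [initial]) (fun x => x) false).getD
          ((PySem.List.sorted (requestArray ++ [initial]) (fun x => x) false).length - 1) 0 -
        (PySem.List.sorted (requestArray ++ [initial]) (fun x => x) false).getD k 0) +
        (if k = 0 then 0
         else ((PySem.List.sorted (requestArray ++ [initial]) (fun x => x) false).getD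
                  ((PySem.List.sorted (requestArray ++ [initial]) (fun x => x) false).length - 1)
                  0 -
                (PySem.List.sorted (requestArray ++ [initial]) (fun x => x) false).getD 0 0) +
              ((PySem.List.sorted (requestArray ++ [initial]) (fun x => x) false).getD (k - 1) 0 -
                (PySem.List.sorted (requestArray ++ [initial]) (fun x => x) false).getD 0 0)) := by
  set s := PySem.List.sorted (requestArray ++ [initial]) (fun x => x) false with hs
  have hpw : s.Pairwise (· ≤ ·) := by
    have := PySem.List.sorted_pairwise (xs := requestArray ++ [initial]) (key := fun x => x)
    simpa [hs] using this
  obtain ⟨hklt, -, -⟩ := PySem.List.getElem_of_index?_eq_some hk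
  show CLOOKloop2 s (2 * s.length + 2)
      (CLOOKloop1 s s.length ((PySem.List.index? s initial).getD 0) 0 1).2.1
      (CLOOKloop1 s s.length ((PySem.List.index? s initial).getD 0) 0 1).2.2
      (CLOOKloop1 s s.length ((PySem.List.index? s initial).getD 0) 0 1).1 = _
  rw [hk]
  simp only [Option.getD_some]
  rw [loop1_spec s hpw (s.length - 1 - k) s.length k 0 1 rfl (by omega) hklt]
  simp only []
  by_cases h0 : k = 0
  · subst h0
    rw [loop2_done s _ _ _ _ (by omega)]
    simp
  · have hc : 1 + (s.length - 1 - k) = s.length - k := by omega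
    rw [hc, loop2_start s hpw k _ (by omega) (by omega)]
    simp [h0]
    ring


-- ===== B-side characterisation =====

-- option running max (the `below` accumulator)
def omax (b : Option Int) (x : Int) : Option Int :=
  some (match b with | none => x | some v => max v x)

theorem CLOOKstep_eq (initial lo hi : Int) (bel : Option Int) (x : Int) :
    CLOOKstep initial (lo, hi, bel) x =
      (min lo x, max hi x, if x < initial then omax bel x else bel) := by
  have h1 : (if x < lo then x else lo) = min lo x := by
    rcases lt_or_ge x lo with h | h
    · simp [h, min_eq_right (le_of_lt h)]
    · simp [not_lt.mpr h, min_eq_left h]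
  have h2 : (if x > hi then x else hi) = max hi x := by
    rcases lt_or_ge hi x with h | h
    · simp [h, max_eq_right (le_of_lt h)]
    · simp [not_lt.mpr h, max_eq_left h]
  have h3 : (match bel with
      | none => some x
      | some b => if x > b then some x else some b) = omax bel x := by
    cases bel with
    | none => rfl
    | some b =>
      unfold omax
      rcases lt_or_ge b x with h | h
      · simp [h, max_eq_right (le_of_lt h)]
      · simp [not_lt.mpr h, max_eq_left h]
  unfold CLOOKstep
  simp only [h1, h2, h3]

theorem fold_split (initial : Int) :
    ∀ (l : List Int) (lo hi : Int) (bel : Option Int),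
      l.foldl (CLOOKstep initial) (lo, hi, bel) =
        (l.foldl min lo, l.foldl max hi,
          (l.filter (fun x => decide (x < initial))).foldl omax bel) := by
  intro l
  induction l with
  | nil => intro lo hi bel; rfl
  | cons x t ih =>
    intro lo hi bel
    simp only [List.foldl_cons, List.filter_cons, CLOOKstep_eq]
    by_cases hx : x < initial
    · simp only [hx, decide_true, if_pos trivial, ih, List.foldl_cons]
    · simp only [hx, decide_false, ih]
      simp

theorem foldl_min_le (l : List Int) : ∀ a : Int, l.foldl min a ≤ a := by
  induction l with
  | nil => intro a; simp
  | cons x t ih =>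
    intro a
    simp only [List.foldl_cons]
    exact le_trans (ih (min a x)) (min_le_left a x)

theorem le_foldl_max (l : List Int) : ∀ a : Int, a ≤ l.foldl max a := by
  induction l with
  | nil => intro a; simp
  | cons x t ih =>
    intro a
    simp only [List.foldl_cons]
    exact le_trans (le_max_left a x) (ih (max a x))

theorem mem_foldl_max (l : List Int) : ∀ a : Int, l.foldl max a = a ∨ l.foldl max a ∈ l := by
  induction l with
  | nil => intro a; simp
  | cons x t ih =>
    intro a
    simp only [List.foldl_cons]
    rcases ih (max a x) with h | h
    · rw [h]
      rcases le_total a x with hax | hax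
      · right; simp [max_eq_right hax]
      · left; simp [max_eq_left hax]
    · right; simp [h]

theorem foldl_max_mono (l : List Int) : ∀ a : Int, ∀ x ∈ l, x ≤ l.foldl max a := by
  induction l with
  | nil => intro a x hx; simp at hx
  | cons y t ih =>
    intro a x hx
    simp only [List.foldl_cons]
    rcases List.mem_cons.mp hx with rfl | hx
    · exact le_trans (le_max_right a x) (le_foldl_max t _)
    · exact ih (max a y) x hx

theorem foldl_omax_some (l : List Int) :
    ∀ v : Int, l.foldl omax (some v) = some (l.foldl max v) := by
  induction l with
  | nil => intro v; rfl
  | cons x t ih => intro v; simp only [List.foldl_cons]; exact ih (max v x)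


theorem foldl_min_mono (l : List Int) : ∀ a : Int, ∀ x ∈ l, l.foldl min a ≤ x := by
  induction l with
  | nil => intro a x hx; simp at hx
  | cons y t ih =>
    intro a x hx
    simp only [List.foldl_cons]
    rcases List.mem_cons.mp hx with rfl | hx
    · exact le_trans (foldl_min_le t _) (min_le_right a x)
    · exact ih (min a y) x hx

theorem mem_foldl_min (l : List Int) : ∀ a : Int, l.foldl min a = a ∨ l.foldl min a ∈ l := by
  induction l with
  | nil => intro a; simp
  | cons x t ih =>
    intro a
    simp only [List.foldl_cons]
    rcases ih (min a x) with h | h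
    · rw [h]
      rcases le_total a x with hax | hax
      · left; simp [min_eq_left hax]
      · right; simp [min_eq_right hax]
    · right; simp [h]

-- extremal value characterisations (no induction: assembled from the fold bounds)
theorem foldl_max_eq (l : List Int) (a m : Int) (hm : m ∈ l) (hub : ∀ x ∈ l, x ≤ m)
    (ha : a ≤ m) : l.foldl max a = m := by
  refine le_antisymm ?_ (foldl_max_mono l a m hm)
  rcases mem_foldl_max l a with h | h
  · rw [h]; exact ha
  · exact hub _ h

theorem foldl_min_eq (l : List Int) (a m : Int) (hm : m ∈ l) (hlb : ∀ x ∈ l, m ≤ x)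
    (ha : m ≤ a) : l.foldl min a = m := by
  refine le_antisymm (foldl_min_mono l a m hm) ?_
  rcases mem_foldl_min l a with h | h
  · rw [h]; exact ha
  · exact hlb _ h

-- every member of a list sits at some index, getD form
theorem mem_getD (s : List Int) (x : Int) (hx : x ∈ s) :
    ∃ j, j < s.length ∧ s.getD j 0 = x := by
  obtain ⟨j, hj, he⟩ := List.mem_iff_getElem.mp hx
  exact ⟨j, hj, by rw [List.getD_eq_getElem _ _ hj, he]⟩

theorem getD_mem (s : List Int) (j : Nat) (hj : j < s.length) : s.getD j 0 ∈ s := by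
  rw [List.getD_eq_getElem _ _ hj]
  exact List.getElem_mem hj

-- ===== the equivalence =====
theorem CLOOK_eq (requestArray : List Int) (initial : Int) :
    CLOOK requestArray initial = CLOOK_alt requestArray initial := by
  set s := PySem.List.sorted (requestArray ++ [initial]) (fun x => x) false with hs
  have hperm : s.Perm (requestArray ++ [initial]) := PySem.List.sorted_perm _ _ _
  have hpw : s.Pairwise (· ≤ ·) := by
    have := PySem.List.sorted_pairwise (xs := requestArray ++ [initial]) (key := fun x => x)
    simpa [hs] using this
  have hmem : initial ∈ s := hperm.mem_iff.mpr (by simp)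
  obtain ⟨k, hk⟩ := Option.isSome_iff_exists.mp ((PySem.List.index?_isSome_iff _ _).mpr hmem)
  obtain ⟨hklt, hsk, hfirst⟩ := PySem.List.getElem_of_index?_eq_some hk
  have hskD : s.getD k 0 = initial := by rw [List.getD_eq_getElem _ _ hklt, hsk]
  have hn1 : 1 ≤ s.length := by omega
  -- the two extremes
  have hub : ∀ x ∈ s, x ≤ s.getD (s.length - 1) 0 := by
    intro x hx
    obtain ⟨j, hj, he⟩ := mem_getD s x hx
    rw [← he]
    exact pvGetD_mono s hpw j (s.length - 1) (by omega) (by omega)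
  have hlb : ∀ x ∈ s, s.getD 0 0 ≤ x := by
    intro x hx
    obtain ⟨j, hj, he⟩ := mem_getD s x hx
    rw [← he]
    exact pvGetD_mono s hpw 0 j (by omega) hj
  have hmemS : ∀ x ∈ requestArray, x ∈ s := by
    intro x hx
    exact hperm.mem_iff.mpr (by simp [hx])
  -- lo = s[0]
  have hlo : requestArray.foldl min initial = s.getD 0 0 := by
    have h2 : (requestArray ++ [initial]).foldl min initial =
        requestArray.foldl min initial := by
      rw [List.foldl_append]
      simp [min_eq_left (foldl_min_le requestArray initial)]
    rw [← h2, ← hperm.foldl_eq (f := min) initial]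
    exact foldl_min_eq s initial _ (getD_mem s 0 (by omega)) hlb (hlb initial hmem)
  -- hi = s[n-1]
  have hhi : requestArray.foldl max initial = s.getD (s.length - 1) 0 := by
    have h2 : (requestArray ++ [initial]).foldl max initial =
        requestArray.foldl max initial := by
      rw [List.foldl_append]
      simp [max_eq_left (le_foldl_max requestArray initial)]
    rw [← h2, ← hperm.foldl_eq (f := max) initial]
    exact foldl_max_eq s initial _ (getD_mem s (s.length - 1) (by omega)) hub
      (hub initial hmem)
  rw [CLOOK_closed requestArray initial k hk]
  show _ = CLOOK_alt requestArray initial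
  unfold CLOOK_alt
  rw [fold_split]
  simp only [hlo, hhi]
  by_cases hk0 : k = 0
  · -- initial is the minimum: nothing lies below it
    subst hk0
    have hF : requestArray.filter (fun x => decide (x < initial)) = [] := by
      rw [List.filter_eq_nil_iff]
      intro x hx
      simp only [decide_eq_true_eq, not_lt]
      exact le_of_eq_of_le hskD.symm (hlb x (hmemS x hx))
    rw [hF]
    simp only [List.foldl_nil]
    show _ + (0 : Int) = s.getD (s.length - 1) 0 - initial
    rw [hskD]
    ring
  · -- there are requests below `initial`; the largest is s[k-1]
    have hk1 : 1 ≤ k := by omega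
    have hs0lt : s.getD 0 0 < initial := by
      have hle : s.getD 0 0 ≤ initial := hlb initial hmem
      have hne : s.getD 0 0 ≠ initial := by
        rw [List.getD_eq_getElem _ _ (by omega)]
        exact hfirst 0 (by omega)
      omega
    have hbelow_mem : ∀ y, y ∈ s → y < initial →
        y ∈ requestArray.filter (fun x => decide (x < initial)) := by
      intro y hy hylt
      rw [List.mem_filter]
      refine ⟨?_, by simpa using hylt⟩
      have := hperm.mem_iff.mp hy
      rcases List.mem_append.mp this with h | h
      · exact h
      · simp at h; omega
    have hF0 : s.getD 0 0 ∈ requestArray.filter (fun x => decide (x < initial)) :=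
      hbelow_mem _ (getD_mem s 0 (by omega)) hs0lt
    obtain ⟨y, ys, hys⟩ : ∃ y ys,
        requestArray.filter (fun x => decide (x < initial)) = y :: ys := by
      rcases hFe : requestArray.filter (fun x => decide (x < initial)) with _ | ⟨y, ys⟩
      · rw [hFe] at hF0; simp at hF0
      · exact ⟨y, ys, rfl⟩
    rw [hys]
    simp only [List.foldl_cons, show omax none y = some y from rfl, foldl_omax_some]
    set m := ys.foldl max y with hm
    have hmF : m ∈ y :: ys := by
      rcases mem_foldl_max ys y with h | h
      · rw [hm, h]; simp
      · rw [hm]; simp [h]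
    have hmub : ∀ z ∈ y :: ys, z ≤ m := by
      intro z hz
      rcases List.mem_cons.mp hz with rfl | hz
      · exact le_foldl_max ys z
      · exact foldl_max_mono ys y z hz
    have hmra : m ∈ requestArray ∧ m < initial := by
      have := hys ▸ hmF
      rw [List.mem_filter] at this
      exact ⟨this.1, by simpa using this.2⟩
    have hms : m ∈ s := hmemS m hmra.1
    have hk1lt : s.getD (k - 1) 0 < initial := by
      have hle : s.getD (k - 1) 0 ≤ initial := by
        rw [← hskD]
        exact pvGetD_mono s hpw (k - 1) k (by omega) hklt
      have hne : s.getD (k - 1) 0 ≠ initial := by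
        rw [List.getD_eq_getElem _ _ (by omega)]
        exact hfirst (k - 1) (by omega)
      omega
    have h1 : m ≤ s.getD (k - 1) 0 := by
      obtain ⟨j, hj, he⟩ := mem_getD s m hms
      have hjk : j < k := by
        by_contra hge
        have : s.getD k 0 ≤ s.getD j 0 := pvGetD_mono s hpw k j (by omega) hj
        rw [hskD, he] at this
        omega
      rw [← he]
      exact pvGetD_mono s hpw j (k - 1) (by omega) (by omega)
    have h2 : s.getD (k - 1) 0 ≤ m := by
      have := hbelow_mem _ (getD_mem s (k - 1) (by omega)) hk1lt
      rw [hys] at this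
      exact hmub _ this
    have hmk : m = s.getD (k - 1) 0 := le_antisymm h1 h2
    simp only [hmk, if_neg hk0]
    rw [hskD]
    ring

-- ===== VERDICT (by name: the statement is the Claim_ definition above) =====
theorem CLOOK_spec : Claim_equal_CLOOK := by
  intro requestArray initial _
  unfold Spec_CLOOK
  exact CLOOK_eq requestArray initial
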